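-- pv_equiv track=rewrite | github.com/Lloyd404bros/Brigh | src/brigh/detectors.py | _detect_framework_with_evidence
-- ===== SOURCE A (Python) =====
-- def _detect_framework_with_evidence(
--     pkg: dict | None,
--     py_deps: list[str],
--     configs: dict[str, str],
--     files: list[str],
-- ) -> tuple[str | None, str | None]:
--     """Detect the primary framework plus evidence."""
--     if pkg:
--         deps = set(pkg.get("dependencies", []) + pkg.get("dev_dependencies", []))
--
--         if "next" in deps or any(f in configs for f in ("next.config.js", "next.config.ts", "next.config.mjs")):
--             return "Next.js", "Detected from Next.js dependency/config"
--         if "nuxt" in deps or "nuxt3" in deps: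
--             return "Nuxt", "Detected from Nuxt dependency"
--         if "gatsby" in deps:
--             return "Gatsby", "Detected from Gatsby dependency"
--         if "remix" in deps or "@remix-run/node" in deps:
--             return "Remix", "Detected from Remix dependency"
--         if "astro" in deps:
--             return "Astro", "Detected from Astro dependency"
--         if "svelte" in deps or "@sveltejs/kit" in deps:
--             if "@sveltejs/kit" in deps:
--                 return "SvelteKit", "Detected from @sveltejs/kit dependency"
--             return "Svelte", "Detected from svelte dependency"
--         if "vue" in deps:
--             return "Vue", "Detected from vue dependency"
--         if "react" in deps:
--             return "React", "Detected from react dependency"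
--         if "angular" in deps or "@angular/core" in deps:
--             return "Angular", "Detected from Angular dependency"
--         if "express" in deps:
--             return "Express", "Detected from express dependency"
--
--     # Python frameworks.
--     if "django" in py_deps:
--         return "Django", "Detected from django dependency"
--     if "flask" in py_deps:
--         return "Flask", "Detected from flask dependency"
--     if "fastapi" in py_deps:
--         return "FastAPI", "Detected from fastapi dependency"
--
--     return None, None
-- ===== SOURCE B (Python) =====
-- _JS_RANK = {
--     "next": (0, "Next.js", "Detected from Next.js dependency/config"),
--     "nuxt": (1, "Nuxt", "Detected from Nuxt dependency"),
--     "nuxt3": (1, "Nuxt", "Detected from Nuxt dependency"),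
--     "gatsby": (2, "Gatsby", "Detected from Gatsby dependency"),
--     "remix": (3, "Remix", "Detected from Remix dependency"),
--     "@remix-run/node": (3, "Remix", "Detected from Remix dependency"),
--     "astro": (4, "Astro", "Detected from Astro dependency"),
--     "@sveltejs/kit": (5, "SvelteKit", "Detected from @sveltejs/kit dependency"),
--     "svelte": (6, "Svelte", "Detected from svelte dependency"),
--     "vue": (7, "Vue", "Detected from vue dependency"),
--     "react": (8, "React", "Detected from react dependency"),
--     "angular": (9, "Angular", "Detected from Angular dependency"),
--     "@angular/core": (9, "Angular", "Detected from Angular dependency"),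
--     "express": (10, "Express", "Detected from express dependency"),
-- }
--
-- _PY_RANK = {
--     "django": (0, "Django", "Detected from django dependency"),
--     "flask": (1, "Flask", "Detected from flask dependency"),
--     "fastapi": (2, "FastAPI", "Detected from fastapi dependency"),
-- }
--
--
-- def _min_rank(items, table):
--     """Lowest-ranked table entry among items (single pass, argmin)."""
--     best = None
--     for x in items:
--         r = table.get(x)
--         if r is not None and (best is None or r[0] < best[0]):
--             best = r
--     return best
--
--
-- def _detect_framework_with_evidence(pkg, py_deps, configs, files):
--     """Detect the primary framework plus evidence (priority-table argmin)."""
--     if pkg: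
--         best = _min_rank(pkg.get("dependencies", []) + pkg.get("dev_dependencies", []), _JS_RANK)
--         if any(f in configs for f in ("next.config.js", "next.config.ts", "next.config.mjs")) and (best is None or best[0] > 0):
--             best = _JS_RANK["next"]
--         if best is not None:
--             return best[1], best[2]
--     best = _min_rank(py_deps, _PY_RANK)
--     if best is not None:
--         return best[1], best[2]
--     return None, None
-- ===== Notes on version B (the rewrite author's own statement) =====
-- stated objective: alternative
-- what changed: Replaced the hard-coded ordered if-cascade by two literal priority tables (dep name -> (rank, framework, evidence)) and a single argmin pass over the dependency list keeping the lowest-ranked entry, with the Next.js config files folded in as a rank-0 override; the Python-deps check uses the same argmin helper over its own table.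
import Mathlib
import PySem

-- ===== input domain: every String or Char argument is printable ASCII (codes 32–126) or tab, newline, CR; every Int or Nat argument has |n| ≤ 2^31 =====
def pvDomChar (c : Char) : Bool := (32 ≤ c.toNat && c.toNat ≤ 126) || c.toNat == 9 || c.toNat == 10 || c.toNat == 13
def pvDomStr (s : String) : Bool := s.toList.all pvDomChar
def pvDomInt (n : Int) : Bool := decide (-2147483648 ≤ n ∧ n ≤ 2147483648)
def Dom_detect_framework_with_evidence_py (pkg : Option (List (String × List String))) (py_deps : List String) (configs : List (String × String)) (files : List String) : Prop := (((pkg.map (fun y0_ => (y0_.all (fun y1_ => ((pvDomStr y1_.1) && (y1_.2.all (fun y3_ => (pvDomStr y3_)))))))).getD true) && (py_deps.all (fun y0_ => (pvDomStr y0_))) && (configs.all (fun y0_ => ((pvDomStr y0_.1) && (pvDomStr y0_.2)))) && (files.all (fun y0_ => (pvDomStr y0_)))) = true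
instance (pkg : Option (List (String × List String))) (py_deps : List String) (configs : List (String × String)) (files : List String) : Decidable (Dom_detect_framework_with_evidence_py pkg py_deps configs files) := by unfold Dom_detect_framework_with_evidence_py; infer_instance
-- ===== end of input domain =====

-- B replaces A's ordered if-cascade by two literal priority tables and a single argmin pass
-- over each dependency list (lowest rank wins); objective: alternative.

-- ===== PORT A =====
def detect_framework_with_evidence_py (pkg : Option (List (String × List String))) (py_deps : List String) (configs : List (String × String)) (files : List String) : Option String × Option String :=
  let pyPart : Option String × Option String :=
    if py_deps.contains "django" then (some "Django", some "Detected from django dependency")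
    else if py_deps.contains "flask" then (some "Flask", some "Detected from flask dependency")
    else if py_deps.contains "fastapi" then (some "FastAPI", some "Detected from fastapi dependency")
    else (none, none)
  match pkg with
  | none => pyPart
  | some p =>
    if p.isEmpty then pyPart
    else
      let d : PySem.Dict String (List String) := PySem.Dict.mk p
      let deps : PySem.Set String := PySem.Set.ofList (d.getD "dependencies" [] ++ d.getD "dev_dependencies" [])
      let cfg : PySem.Dict String String := PySem.Dict.mk configs
      if deps.contains "next" || (["next.config.js", "next.config.ts", "next.config.mjs"].any (fun f => cfg.contains f)) then
        (some "Next.js", some "Detected from Next.js dependency/config")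
      else if deps.contains "nuxt" || deps.contains "nuxt3" then (some "Nuxt", some "Detected from Nuxt dependency")
      else if deps.contains "gatsby" then (some "Gatsby", some "Detected from Gatsby dependency")
      else if deps.contains "remix" || deps.contains "@remix-run/node" then (some "Remix", some "Detected from Remix dependency")
      else if deps.contains "astro" then (some "Astro", some "Detected from Astro dependency")
      else if deps.contains "svelte" || deps.contains "@sveltejs/kit" then
        (if deps.contains "@sveltejs/kit" then (some "SvelteKit", some "Detected from @sveltejs/kit dependency")
         else (some "Svelte", some "Detected from svelte dependency"))
      else if deps.contains "vue" then (some "Vue", some "Detected from vue dependency")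
      else if deps.contains "react" then (some "React", some "Detected from react dependency")
      else if deps.contains "angular" || deps.contains "@angular/core" then (some "Angular", some "Detected from Angular dependency")
      else if deps.contains "express" then (some "Express", some "Detected from express dependency")
      else pyPart

-- ===== PORT B =====
-- the literal priority tables _JS_RANK / _PY_RANK of Source B
def pvJsRank : PySem.Dict String (Int × String × String) := PySem.Dict.mk
  [ ("next", (0, "Next.js", "Detected from Next.js dependency/config")),
    ("nuxt", (1, "Nuxt", "Detected from Nuxt dependency")),
    ("nuxt3", (1, "Nuxt", "Detected from Nuxt dependency")),
    ("gatsby", (2, "Gatsby", "Detected from Gatsby dependency")),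
    ("remix", (3, "Remix", "Detected from Remix dependency")),
    ("@remix-run/node", (3, "Remix", "Detected from Remix dependency")),
    ("astro", (4, "Astro", "Detected from Astro dependency")),
    ("@sveltejs/kit", (5, "SvelteKit", "Detected from @sveltejs/kit dependency")),
    ("svelte", (6, "Svelte", "Detected from svelte dependency")),
    ("vue", (7, "Vue", "Detected from vue dependency")),
    ("react", (8, "React", "Detected from react dependency")),
    ("angular", (9, "Angular", "Detected from Angular dependency")),
    ("@angular/core", (9, "Angular", "Detected from Angular dependency")),
    ("express", (10, "Express", "Detected from express dependency")) ]

def pvPyRank : PySem.Dict String (Int × String × String) := PySem.Dict.mk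
  [ ("django", (0, "Django", "Detected from django dependency")),
    ("flask", (1, "Flask", "Detected from flask dependency")),
    ("fastapi", (2, "FastAPI", "Detected from fastapi dependency")) ]

-- Source B's _min_rank loop body: keep the lower-ranked entry (the first seen wins a tie)
def pvMinRankStep (table : PySem.Dict String (Int × String × String)) (best : Option (Int × String × String)) (x : String) : Option (Int × String × String) :=
  match table.get? x with
  | none => best
  | some r =>
    match best with
    | none => some r
    | some b => if r.1 < b.1 then some r else some b

-- Source B's _min_rank: one pass over items with the running best
def pvMinRank (items : List String) (table : PySem.Dict String (Int × String × String)) : Option (Int × String × String) :=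
  items.foldl (pvMinRankStep table) none

def detect_framework_with_evidence_py_alt (pkg : Option (List (String × List String))) (py_deps : List String) (configs : List (String × String)) (files : List String) : Option String × Option String :=
  let jsBest : Option (Int × String × String) :=
    match pkg with
    | none => none
    | some p =>
      if p.isEmpty then none
      else
        let d : PySem.Dict String (List String) := PySem.Dict.mk p
        let best := pvMinRank (d.getD "dependencies" [] ++ d.getD "dev_dependencies" []) pvJsRank
        let cfg : PySem.Dict String String := PySem.Dict.mk configs
        if (["next.config.js", "next.config.ts", "next.config.mjs"].any (fun f => cfg.contains f))
            && (match best with | none => true | some b => decide (0 < b.1)) then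
          pvJsRank.get? "next"   -- _JS_RANK["next"]: the key is in the literal table, so this is its entry (no KeyError)
        else best
  match jsBest with
  | some r => (some r.2.1, some r.2.2)
  | none =>
    match pvMinRank py_deps pvPyRank with
    | some r => (some r.2.1, some r.2.2)
    | none => (none, none)

-- ===== PRECONDITION & SPEC =====
def Spec_detect_framework_with_evidence_py (pkg : Option (List (String × List String))) (py_deps : List String) (configs : List (String × String)) (files : List String) (out : Option String × Option String) : Prop := out = detect_framework_with_evidence_py_alt pkg py_deps configs files
instance (pkg : Option (List (String × List String))) (py_deps : List String) (configs : List (String × String)) (files : List String) (out : Option String × Option String) : Decidable (Spec_detect_framework_with_evidence_py pkg py_deps configs files out) := by unfold Spec_detect_framework_with_evidence_py; infer_instance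

-- ===== CLAIM (what is proved, stated in full; the proofs are below) =====
def Claim_equal_detect_framework_with_evidence_py : Prop := ∀ (pkg : Option (List (String × List String))) (py_deps : List String) (configs : List (String × String)) (files : List String), Dom_detect_framework_with_evidence_py pkg py_deps configs files → Spec_detect_framework_with_evidence_py pkg py_deps configs files (detect_framework_with_evidence_py pkg py_deps configs files)

-- ===== LEMMAS AND PROOFS =====

-- left-biased minimum on optional (rank, payload) entries
def pvOmin (a b : Option (Int × String × String)) : Option (Int × String × String) :=
  match a, b with
  | none, b => b
  | some a, none => some a
  | some a, some r => if r.1 < a.1 then some r else some a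

-- first-match cascade over (condition, entry) rules
def pvCascade : List (Bool × (Int × String × String)) → Option (Int × String × String)
  | [] => none
  | (c, e) :: rs => if c then some e else pvCascade rs

theorem pvMinRankStep_eq (table : PySem.Dict String (Int × String × String)) (best : Option (Int × String × String)) (x : String) :
    pvMinRankStep table best x = pvOmin best (table.get? x) := by
  unfold pvMinRankStep pvOmin
  cases table.get? x <;> cases best <;> rfl

theorem pvOmin_assoc (a b c : Option (Int × String × String)) :
    pvOmin (pvOmin a b) c = pvOmin a (pvOmin b c) := by
  cases a <;> cases b <;> cases c <;>
    simp only [pvOmin] <;> split_ifs <;> simp only [pvOmin] <;> split_ifs <;>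
      first | rfl | omega

theorem pvOmin_none_right (a : Option (Int × String × String)) : pvOmin a none = a := by
  cases a <;> rfl

theorem pvMinRank_fold (table : PySem.Dict String (Int × String × String)) (t : List String) (acc : Option (Int × String × String)) :
    t.foldl (pvMinRankStep table) acc = pvOmin acc (pvMinRank t table) := by
  induction t generalizing acc with
  | nil => simp [pvMinRank, List.foldl, pvOmin_none_right]
  | cons x t ih =>
    show List.foldl _ (pvMinRankStep table acc x) t = _
    rw [ih, pvMinRankStep_eq]
    have h2 : pvMinRank (x :: t) table = pvOmin (table.get? x) (pvMinRank t table) := by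
      show List.foldl _ (pvMinRankStep table none x) t = _
      rw [ih, pvMinRankStep_eq]
      rfl
    rw [h2, pvOmin_assoc]

theorem pvMinRank_cons (table : PySem.Dict String (Int × String × String)) (x : String) (t : List String) :
    pvMinRank (x :: t) table = pvOmin (table.get? x) (pvMinRank t table) := by
  show List.foldl _ (pvMinRankStep table none x) t = _
  rw [pvMinRank_fold, pvMinRankStep_eq]
  rfl

theorem pvCascade_mem (rs : List (Bool × (Int × String × String))) (e : Int × String × String)
    (h : pvCascade rs = some e) : e ∈ rs.map (·.2) := by
  induction rs with
  | nil => simp [pvCascade] at h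
  | cons r rs ih =>
    obtain ⟨c, e'⟩ := r
    by_cases hc : c
    · simp [pvCascade, hc] at h
      simp [h]
    · simp [pvCascade, hc] at h
      simp [ih h]

theorem pvCascade_false (rs : List (Bool × (Int × String × String))) (h : ∀ r ∈ rs, r.1 = false) :
    pvCascade rs = none := by
  induction rs with
  | nil => rfl
  | cons r rs ih =>
    obtain ⟨c, e⟩ := r
    have hc : c = false := h (c, e) (by simp)
    simp [pvCascade, hc]
    exact ih (fun r hr => h r (by simp [hr]))

-- one argmin step against a rank-sorted, rank-coherent rule table
theorem pvOmin_get?_cascade (x : String) (t : List String) (items : List (String × (Int × String × String)))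
    (hsort : items.Pairwise (fun p q => p.2.1 ≤ q.2.1))
    (hcoh : ∀ p ∈ items, ∀ q ∈ items, p.2.1 = q.2.1 → p.2 = q.2) :
    pvOmin ((PySem.Dict.mk items).get? x) (pvCascade (items.map fun p => (t.contains p.1, p.2)))
      = pvCascade (items.map fun p => ((p.1 == x || t.contains p.1), p.2)) := by
  induction items with
  | nil => rfl
  | cons p rest ih =>
    rw [PySem.Dict.get?_mk_cons]
    have hsort' := (List.pairwise_cons.mp hsort).2
    have hle : ∀ q ∈ rest, p.2.1 ≤ q.2.1 := (List.pairwise_cons.mp hsort).1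
    have hcoh' : ∀ a ∈ rest, ∀ b ∈ rest, a.2.1 = b.2.1 → a.2 = b.2 :=
      fun a ha b hb => hcoh a (by simp [ha]) b (by simp [hb])
    by_cases hx : (p.1 == x) = true
    · -- the key matches the head entry
      rw [if_pos hx]
      simp only [List.map_cons, pvCascade, hx, Bool.true_or, if_true]
      by_cases hc : t.contains p.1 = true
      · rw [if_pos hc]
        simp [pvOmin]
      · rw [if_neg hc]
        cases hres : pvCascade (rest.map fun p => (t.contains p.1, p.2)) with
        | none => simp [pvOmin]
        | some e =>
          have he : e ∈ rest.map (·.2) := by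
            have := pvCascade_mem _ _ hres
            simpa using this
          obtain ⟨q, hq, hqe⟩ := List.mem_map.mp he
          have hpe : p.2.1 ≤ e.1 := hqe ▸ hle q hq
          simp only [pvOmin]
          split_ifs with hlt
          · omega
          · rfl
    · -- the key does not match the head entry
      have hx' : (p.1 == x) = false := by
        simpa using hx
      rw [if_neg hx]
      simp only [List.map_cons, pvCascade, hx', Bool.false_or]
      by_cases hc : t.contains p.1 = true
      · rw [if_pos hc, if_pos hc]
        cases hg : (PySem.Dict.mk rest).get? x with
        | none => simp [pvOmin]
        | some g =>
          have hgmem : (x, g) ∈ rest := by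
            have := PySem.Dict.mem_items_of_get?_eq_some _ hg
            simpa using this
          have hle' : p.2.1 ≤ g.1 := hle (x, g) hgmem
          simp only [pvOmin]
          split_ifs with hlt
          · rfl
          · have heq : g.1 = p.2.1 := by omega
            have := hcoh (x, g) (by simp [hgmem]) p (by simp) heq
            exact congrArg some this
      · rw [if_neg hc, if_neg hc]
        exact ih hsort' hcoh'

-- Source B's argmin over a rank-sorted, rank-coherent table is the first-match cascade over its rules
theorem pvMinRank_cascade (items : List (String × (Int × String × String)))
    (hsort : items.Pairwise (fun p q => p.2.1 ≤ q.2.1))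
    (hcoh : ∀ p ∈ items, ∀ q ∈ items, p.2.1 = q.2.1 → p.2 = q.2)
    (t : List String) :
    pvMinRank t (PySem.Dict.mk items) = pvCascade (items.map fun p => (t.contains p.1, p.2)) := by
  induction t with
  | nil =>
    rw [pvCascade_false]
    · rfl
    · intro r hr
      obtain ⟨q, _, hq⟩ := List.mem_map.mp hr
      simp [← hq]
  | cons x t ih =>
    rw [pvMinRank_cons, ih, pvOmin_get?_cascade x t items hsort hcoh]
    rfl

-- the A-side Python-framework cascade against B's 3-rule table, over arbitrary membership booleans
theorem pv_py_eq (b1 b2 b3 : Bool) :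
    (if b1 then ((some "Django" : Option String), (some "Detected from django dependency" : Option String))
     else if b2 then (some "Flask", some "Detected from flask dependency")
     else if b3 then (some "FastAPI", some "Detected from fastapi dependency")
     else (none, none))
    = (match pvCascade [(b1, (0, "Django", "Detected from django dependency")),
                        (b2, (1, "Flask", "Detected from flask dependency")),
                        (b3, (2, "FastAPI", "Detected from fastapi dependency"))] with
       | some r => ((some r.2.1 : Option String), (some r.2.2 : Option String))
       | none => (none, none)) := by
  cases b1 with
  | true => rfl
  | false => cases b2 with
    | true => rfl
    | false => cases b3 <;> rfl

-- the A-side JS cascade against B's 14-rule table plus the config override, over arbitrary booleans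
theorem pv_js_eq (b1 b2 b3 b4 b5 b6 b7 b8 b9 b10 b11 b12 b13 b14 cfg : Bool)
    (tail : Option String × Option String) :
    (if b1 || cfg then ((some "Next.js" : Option String), (some "Detected from Next.js dependency/config" : Option String))
     else if b2 || b3 then (some "Nuxt", some "Detected from Nuxt dependency")
     else if b4 then (some "Gatsby", some "Detected from Gatsby dependency")
     else if b5 || b6 then (some "Remix", some "Detected from Remix dependency")
     else if b7 then (some "Astro", some "Detected from Astro dependency")
     else if b9 || b8 then
       (if b8 then (some "SvelteKit", some "Detected from @sveltejs/kit dependency")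
        else (some "Svelte", some "Detected from svelte dependency"))
     else if b10 then (some "Vue", some "Detected from vue dependency")
     else if b11 then (some "React", some "Detected from react dependency")
     else if b12 || b13 then (some "Angular", some "Detected from Angular dependency")
     else if b14 then (some "Express", some "Detected from express dependency")
     else tail)
    = (match
        (if cfg && (match pvCascade
              [ (b1, (0, "Next.js", "Detected from Next.js dependency/config")),
                (b2, (1, "Nuxt", "Detected from Nuxt dependency")),
                (b3, (1, "Nuxt", "Detected from Nuxt dependency")),
                (b4, (2, "Gatsby", "Detected from Gatsby dependency")),
                (b5, (3, "Remix", "Detected from Remix dependency")),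
                (b6, (3, "Remix", "Detected from Remix dependency")),
                (b7, (4, "Astro", "Detected from Astro dependency")),
                (b8, (5, "SvelteKit", "Detected from @sveltejs/kit dependency")),
                (b9, (6, "Svelte", "Detected from svelte dependency")),
                (b10, (7, "Vue", "Detected from vue dependency")),
                (b11, (8, "React", "Detected from react dependency")),
                (b12, (9, "Angular", "Detected from Angular dependency")),
                (b13, (9, "Angular", "Detected from Angular dependency")),
                (b14, (10, "Express", "Detected from express dependency")) ] with
            | none => true
            | some b => decide (0 < b.1)) then
          some (0, "Next.js", "Detected from Next.js dependency/config")
        else pvCascade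
              [ (b1, (0, "Next.js", "Detected from Next.js dependency/config")),
                (b2, (1, "Nuxt", "Detected from Nuxt dependency")),
                (b3, (1, "Nuxt", "Detected from Nuxt dependency")),
                (b4, (2, "Gatsby", "Detected from Gatsby dependency")),
                (b5, (3, "Remix", "Detected from Remix dependency")),
                (b6, (3, "Remix", "Detected from Remix dependency")),
                (b7, (4, "Astro", "Detected from Astro dependency")),
                (b8, (5, "SvelteKit", "Detected from @sveltejs/kit dependency")),
                (b9, (6, "Svelte", "Detected from svelte dependency")),
                (b10, (7, "Vue", "Detected from vue dependency")),
                (b11, (8, "React", "Detected from react dependency")),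
                (b12, (9, "Angular", "Detected from Angular dependency")),
                (b13, (9, "Angular", "Detected from Angular dependency")),
                (b14, (10, "Express", "Detected from express dependency")) ]) with
       | some r => ((some r.2.1 : Option String), (some r.2.2 : Option String))
       | none => tail) := by
  cases cfg with
  | true =>
    cases b1 with
    | true => rfl
    | false => cases b2 with
      | true => rfl
      | false => cases b3 with
        | true => rfl
        | false => cases b4 with
          | true => rfl
          | false => cases b5 with
            | true => rfl
            | false => cases b6 with
              | true => rfl
              | false => cases b7 with
                | true => rfl
                | false => cases b8 with
                  | true => rfl
                  | false => cases b9 with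
                    | true => rfl
                    | false => cases b10 with
                      | true => rfl
                      | false => cases b11 with
                        | true => rfl
                        | false => cases b12 with
                          | true => rfl
                          | false => cases b13 with
                            | true => rfl
                            | false => cases b14 <;> rfl
  | false =>
    cases b1 with
    | true => rfl
    | false => cases b2 with
      | true => rfl
      | false => cases b3 with
        | true => rfl
        | false => cases b4 with
          | true => rfl
          | false => cases b5 with
            | true => rfl
            | false => cases b6 with
              | true => rfl
              | false => cases b7 with
                | true => rfl
                | false => cases b8 with
                  | true => cases b9 <;> rfl
                  | false => cases b9 with
                    | true => rfl
                    | false => cases b10 with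
                      | true => rfl
                      | false => cases b11 with
                        | true => rfl
                        | false => cases b12 with
                          | true => rfl
                          | false => cases b13 with
                            | true => rfl
                            | false => cases b14 <;> rfl

theorem pv_set_contains (L : List String) (k : String) :
    (PySem.Set.ofList L).contains k = L.contains k := by
  simp [PySem.Set.contains]

theorem pv_get_next : pvJsRank.get? "next" = some (0, "Next.js", "Detected from Next.js dependency/config") := by
  simp [pvJsRank, PySem.Dict.get?_mk_cons]

-- ===== VERDICT (by name: the statement is the Claim_ definition above) =====
theorem detect_framework_with_evidence_py_spec : Claim_equal_detect_framework_with_evidence_py := by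
  intro pkg py_deps configs files _
  unfold Spec_detect_framework_with_evidence_py detect_framework_with_evidence_py detect_framework_with_evidence_py_alt
  have hpy : pvMinRank py_deps pvPyRank
      = pvCascade [(py_deps.contains "django", (0, "Django", "Detected from django dependency")),
                   (py_deps.contains "flask", (1, "Flask", "Detected from flask dependency")),
                   (py_deps.contains "fastapi", (2, "FastAPI", "Detected from fastapi dependency"))] := by
    rw [show pvPyRank = PySem.Dict.mk _ from rfl,
        pvMinRank_cascade _ (by decide) (by decide) py_deps]
    rfl
  cases pkg with
  | none =>
    simp only [hpy]
    exact pv_py_eq _ _ _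
  | some p =>
    by_cases hp : p.isEmpty
    · simp only [hp, if_true, hpy]
      exact pv_py_eq _ _ _
    · simp only [hp, Bool.false_eq_true, if_false]
      have hjs : ∀ t : List String, pvMinRank t pvJsRank
          = pvCascade
              [ (t.contains "next", (0, "Next.js", "Detected from Next.js dependency/config")),
                (t.contains "nuxt", (1, "Nuxt", "Detected from Nuxt dependency")),
                (t.contains "nuxt3", (1, "Nuxt", "Detected from Nuxt dependency")),
                (t.contains "gatsby", (2, "Gatsby", "Detected from Gatsby dependency")),
                (t.contains "remix", (3, "Remix", "Detected from Remix dependency")),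
                (t.contains "@remix-run/node", (3, "Remix", "Detected from Remix dependency")),
                (t.contains "astro", (4, "Astro", "Detected from Astro dependency")),
                (t.contains "@sveltejs/kit", (5, "SvelteKit", "Detected from @sveltejs/kit dependency")),
                (t.contains "svelte", (6, "Svelte", "Detected from svelte dependency")),
                (t.contains "vue", (7, "Vue", "Detected from vue dependency")),
                (t.contains "react", (8, "React", "Detected from react dependency")),
                (t.contains "angular", (9, "Angular", "Detected from Angular dependency")),
                (t.contains "@angular/core", (9, "Angular", "Detected from Angular dependency")),
                (t.contains "express", (10, "Express", "Detected from express dependency")) ] := by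
        intro t
        rw [show pvJsRank = PySem.Dict.mk _ from rfl,
            pvMinRank_cascade _ (by decide) (by decide) t]
        rfl
      simp only [hjs, hpy, pv_set_contains, pv_get_next]
      rw [pv_py_eq]
      exact pv_js_eq _ _ _ _ _ _ _ _ _ _ _ _ _ _ _ _
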